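-- pv_equiv track=rewrite | github.com/lukasalexanderweber/replace-invalid-osm-ids | replace_invalid_osm_ids.py | get_id_map
-- ===== SOURCE A (Python) =====
-- def get_id_map(ids):
--     """
--     Returns a dict with
--     invalid ids as keys +
--     a valid replacement as value"""
--     valid_ids = [int(i) for i in ids if int(i) >= 1]
--     invalid_ids = [int(i) for i in ids if int(i) < 1]
--
--     new_id = 1
--     id_map = {}
--
--     for invalid_id in invalid_ids:
--         while new_id in valid_ids:
--             new_id += 1
--         id_map[invalid_id] = new_id
--         valid_ids.append(new_id)
--
--     return id_map
-- ===== SOURCE B (Python) =====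
-- def get_id_map(ids):
--     """
--     Returns a dict with
--     invalid ids as keys +
--     a valid replacement as value"""
--     valid = {int(i) for i in ids if int(i) >= 1}
--     invalid_ids = [int(i) for i in ids if int(i) < 1]
--
--     m = len(invalid_ids)
--     # the m smallest positive integers outside `valid` all lie in 1..m+len(valid):
--     # bulk set difference over that bounded candidate range, then sort and slice.
--     available = sorted(set(range(1, m + len(valid) + 1)) - valid)[:m]
--
--     return dict(zip(invalid_ids, available))
-- ===== Notes on version B (the rewrite author's own statement) =====
-- stated objective: alternative
-- what changed: A assigns ids one by one, rescanning and mutating a growing valid_ids list per invalid id; B does no incremental assignment: it takes the bounded candidate range 1..m+len(valid), removes the valid ids by one bulk set difference, sorts, slices the first m, and zips them onto the invalid ids.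
import Mathlib
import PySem

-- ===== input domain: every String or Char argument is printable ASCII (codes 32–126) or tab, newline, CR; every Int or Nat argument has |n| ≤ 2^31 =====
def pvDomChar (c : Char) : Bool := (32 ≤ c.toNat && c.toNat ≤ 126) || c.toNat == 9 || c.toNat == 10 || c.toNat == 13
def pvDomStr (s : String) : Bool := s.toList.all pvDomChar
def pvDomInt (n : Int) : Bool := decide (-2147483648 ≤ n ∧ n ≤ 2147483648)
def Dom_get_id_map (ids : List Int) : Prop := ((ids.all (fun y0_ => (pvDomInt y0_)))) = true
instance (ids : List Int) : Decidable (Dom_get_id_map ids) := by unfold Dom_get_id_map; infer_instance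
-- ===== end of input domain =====

-- B replaces A's per-invalid-id while-loop over a growing valid_ids list by a bulk set
-- difference on the bounded candidate range 1..m+len(valid), sorted and sliced, then zipped.

-- ===== PORT A =====
-- 'while new_id in valid_ids: new_id += 1', totalised with fuel; fuel = valid_ids.length + 1
-- always suffices (at most valid_ids.length consecutive integers can lie in valid_ids), proved in pvSkipA_eq below.
def pvSkipA (valid : List Int) : Nat → Int → Int
  | 0, n => n
  | fuel + 1, n => if n ∈ valid then pvSkipA valid fuel (n + 1) else n

def pvStepA (st : Int × PySem.Dict Int Int × List Int) (invalid_id : Int) :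
    Int × PySem.Dict Int Int × List Int :=
  let newId := pvSkipA st.2.2 (st.2.2.length + 1) st.1
  (newId, st.2.1.insert invalid_id newId, st.2.2 ++ [newId])

def get_id_map (ids : List Int) : List (Int × Int) :=
  let valid_ids := ids.filter (fun i => 1 ≤ i)
  let invalid_ids := ids.filter (fun i => i < 1)
  ((invalid_ids.foldl pvStepA (1, PySem.Dict.empty, valid_ids)).2.1).items

-- ===== PORT B =====
-- 'sorted(set(range(1, m+len(valid)+1)) - valid)[:m]': range(...) has distinct elements, so the
-- set difference is exactly the filter of the range list by non-membership in `valid`.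
def get_id_map_alt (ids : List Int) : List (Int × Int) :=
  let valid : PySem.Set Int := PySem.Set.ofList (ids.filter (fun i => 1 ≤ i))
  let invalid_ids := ids.filter (fun i => i < 1)
  let m := invalid_ids.length
  let available :=
    (PySem.List.sorted
      ((PySem.List.pyRange 1 ((m : Int) + valid.length + 1) 1).filter (fun n => n ∉ valid))
      (fun x => x) false).take m
  (PySem.Dict.ofList (invalid_ids.zip available)).items

-- ===== PRECONDITION & SPEC =====
def Spec_get_id_map (ids : List Int) (out : List (Int × Int)) : Prop := out = get_id_map_alt ids
instance (ids : List Int) (out : List (Int × Int)) : Decidable (Spec_get_id_map ids out) := by unfold Spec_get_id_map; infer_instance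

-- ===== CLAIM (what is proved, stated in full; the proofs are below) =====
def Claim_equal_get_id_map : Prop := ∀ (ids : List Int), Dom_get_id_map ids → Spec_get_id_map ids (get_id_map ids)

-- ===== LEMMAS AND PROOFS =====

-- smallest k with n + k ∉ V exists (V is finite)
theorem pvEx (V : List Int) (n : Int) : ∃ k : Nat, (n + (k : Int)) ∉ V := by
  by_contra h
  push Not at h
  have hsub : (List.map (fun j : Nat => n + (j : Int)) (List.range (V.length + 1))) ⊆ V := by
    intro x hx
    rcases List.mem_map.1 hx with ⟨j, _, rfl⟩
    exact h j
  have hnd : (List.map (fun j : Nat => n + (j : Int)) (List.range (V.length + 1))).Nodup := by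
    refine List.Nodup.map ?_ List.nodup_range
    intro a b hab
    simp only at hab
    omega
  have := (hnd.subperm hsub).length_le
  simp at this

-- index of the first free slot at or after n, and the slot itself
def pvK (V : List Int) (n : Int) : Nat := Nat.find (pvEx V n)
def pvNf (V : List Int) (n : Int) : Int := n + (pvK V n : Int)

theorem pvNf_not_mem (V : List Int) (n : Int) : pvNf V n ∉ V := Nat.find_spec (pvEx V n)

theorem pvNf_ge (V : List Int) (n : Int) : n ≤ pvNf V n := by
  have : (0 : Int) ≤ (pvK V n : Int) := Int.natCast_nonneg _
  unfold pvNf; omega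

theorem pvK_mem_lt (V : List Int) (n : Int) {j : Nat} (hj : j < pvK V n) : (n + (j : Int)) ∈ V := by
  have := Nat.find_min (pvEx V n) hj
  simpa using this

theorem pvK_succ (V : List Int) {n : Int} (hn : n ∈ V) : pvK V n = pvK V (n + 1) + 1 := by
  have key : ∀ k : Nat, (n + ((k + 1 : Nat) : Int)) ∉ V ↔ (n + 1 + (k : Int)) ∉ V := by
    intro k
    have : n + ((k + 1 : Nat) : Int) = n + 1 + (k : Int) := by push_cast; ring
    rw [this]
  have h2 : ∃ k : Nat, (n + ((k + 1 : Nat) : Int)) ∉ V := by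
    rcases pvEx V (n + 1) with ⟨k, hk⟩
    exact ⟨k, (key k).2 hk⟩
  have h0 : ¬ ((n + ((0 : Nat) : Int)) ∉ V) := by simpa using hn
  have hfind : Nat.find h2 = pvK V (n + 1) :=
    le_antisymm
      (Nat.find_min' h2 ((key _).2 (Nat.find_spec (pvEx V (n + 1)))))
      (Nat.find_min' (pvEx V (n + 1)) ((key _).1 (Nat.find_spec h2)))
  unfold pvK
  rw [Nat.find_comp_succ (pvEx V n) h2 h0]
  exact congrArg (· + 1) hfind

theorem pvNf_mem_step (V : List Int) {n : Int} (hn : n ∈ V) : pvNf V n = pvNf V (n + 1) := by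
  unfold pvNf
  rw [pvK_succ V hn]
  push_cast
  ring

theorem pvK_not_mem (V : List Int) {n : Int} (hn : n ∉ V) : pvK V n = 0 := by
  refine Nat.find_eq_zero (pvEx V n) |>.2 ?_
  simpa using hn

-- congruence: pvK / pvNf only look at membership at or above n
theorem pvK_congr {V W : List Int} {n : Int} (h : ∀ x, n ≤ x → (x ∈ V ↔ x ∈ W)) :
    pvK V n = pvK W n := by
  have hpt : ∀ k : Nat, (n + (k : Int)) ∉ V ↔ (n + (k : Int)) ∉ W := by
    intro k
    have := h (n + (k : Int)) (by have : (0:Int) ≤ (k:Int) := Int.natCast_nonneg _; omega)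
    tauto
  exact le_antisymm
    (Nat.find_min' _ ((hpt _).2 (Nat.find_spec (pvEx W n))))
    (Nat.find_min' _ ((hpt _).1 (Nat.find_spec (pvEx V n))))

theorem pvNf_congr {V W : List Int} {n : Int} (h : ∀ x, n ≤ x → (x ∈ V ↔ x ∈ W)) :
    pvNf V n = pvNf W n := by
  unfold pvNf; rw [pvK_congr h]

-- the fuel bound for A's inner while: pvK never exceeds the number of distinct valid ids ≥ n
def pvD (V : List Int) (n : Int) : Nat := (V.toFinset.filter (fun x => n ≤ x)).card

theorem pvD_bound (V : List Int) (n : Int) :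
    pvK V n + pvD V (pvNf V n + 1) ≤ pvD V n := by
  classical
  set k := pvK V n with hk
  set S : Finset Int := (Finset.range k).image (fun j : Nat => n + (j : Int)) with hS
  have hcardS : S.card = k := by
    rw [hS, Finset.card_image_of_injOn, Finset.card_range]
    intro a _ b _ hab
    simp only at hab
    omega
  have hSsub : S ⊆ V.toFinset.filter (fun x => n ≤ x) := by
    intro x hx
    rcases Finset.mem_image.1 hx with ⟨j, hj, rfl⟩
    refine Finset.mem_filter.2 ⟨List.mem_toFinset.2 (pvK_mem_lt V n (Finset.mem_range.1 hj)), ?_⟩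
    have : (0 : Int) ≤ (j : Int) := Int.natCast_nonneg _
    omega
  have hTsub : V.toFinset.filter (fun x => pvNf V n + 1 ≤ x) ⊆ V.toFinset.filter (fun x => n ≤ x) := by
    intro x hx
    rcases Finset.mem_filter.1 hx with ⟨hm, hge⟩
    refine Finset.mem_filter.2 ⟨hm, ?_⟩
    have := pvNf_ge V n
    omega
  have hdisj : Disjoint S (V.toFinset.filter (fun x => pvNf V n + 1 ≤ x)) := by
    rw [Finset.disjoint_left]
    intro x hx hx'
    rcases Finset.mem_image.1 hx with ⟨j, hj, rfl⟩
    have hj' := Finset.mem_range.1 hj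
    have hge := (Finset.mem_filter.1 hx').2
    unfold pvNf at hge
    rw [← hk] at hge
    omega
  have := Finset.card_le_card (Finset.union_subset hSsub hTsub)
  rw [Finset.card_union_of_disjoint hdisj, hcardS] at this
  exact this

theorem pvK_le_pvD (V : List Int) (n : Int) : pvK V n ≤ pvD V n :=
  le_trans (Nat.le_add_right _ _) (pvD_bound V n)

theorem pvD_le_len (V : List Int) (n : Int) : pvD V n ≤ V.length :=
  le_trans (Finset.card_filter_le _ _) V.toFinset_card_le

theorem pvK_le_len (V : List Int) (n : Int) : pvK V n ≤ V.length :=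
  le_trans (pvK_le_pvD V n) (pvD_le_len V n)

-- A's while loop computes pvNf whenever the fuel exceeds pvK
theorem pvSkipA_eq (V : List Int) : ∀ (fuel : Nat) (n : Int), pvK V n < fuel →
    pvSkipA V fuel n = pvNf V n := by
  intro fuel
  induction fuel with
  | zero => intro n h; omega
  | succ f ih =>
    intro n h
    by_cases hn : n ∈ V
    · rw [pvSkipA, if_pos hn, ih (n + 1) (by have := pvK_succ V hn; omega)]
      exact (pvNf_mem_step V hn).symm
    · rw [pvSkipA, if_neg hn]
      unfold pvNf
      rw [pvK_not_mem V hn]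
      simp

-- the (mathematical) list of the `need` first free slots at or after n
def pvSL (V : List Int) : Nat → Int → List Int
  | 0, _ => []
  | k + 1, n => pvNf V n :: pvSL V k (pvNf V n + 1)

theorem pvSL_congr {V W : List Int} : ∀ (k : Nat) {n : Int},
    (∀ x, n ≤ x → (x ∈ V ↔ x ∈ W)) → pvSL V k n = pvSL W k n := by
  intro k
  induction k with
  | zero => intro n _; rfl
  | succ k ih =>
    intro n h
    have hnf := pvNf_congr h
    rw [pvSL, pvSL, hnf]
    congr 1
    exact ih (fun x hx => h x (by have := pvNf_ge W n; omega))

-- appending the freshly assigned id a and restarting at a is restarting at a + 1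
theorem pvSL_append {W : List Int} {a : Int} (ha : a ∉ W) :
    ∀ k, pvSL (W ++ [a]) k a = pvSL W k (a + 1) := by
  intro k
  cases k with
  | zero => rfl
  | succ k =>
    have hmem : a ∈ W ++ [a] := by simp
    have hcong : ∀ x, a + 1 ≤ x → (x ∈ W ++ [a] ↔ x ∈ W) := by
      intro x hx
      simp only [List.mem_append, List.mem_singleton]
      constructor
      · rintro (h | rfl)
        · exact h
        · omega
      · exact fun h => Or.inl h
    have hnf : pvNf (W ++ [a]) a = pvNf W (a + 1) := by
      rw [pvNf_mem_step _ hmem, pvNf_congr hcong]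
    simp only [pvSL]
    rw [hnf]
    congr 1
    refine pvSL_congr k ?_
    intro x hx
    exact hcong x (by have := pvNf_ge W (a + 1); omega)

-- A's fold produces the dict of zip(invalid, pvSL)
theorem pvA_fold : ∀ (inv : List Int) (V W : List Int) (n : Int) (m : PySem.Dict Int Int),
    (∀ x, n ≤ x → (x ∈ V ↔ x ∈ W)) →
    (inv.foldl pvStepA (n, m, V)).2.1 =
      (inv.zip (pvSL W inv.length n)).foldl (fun d p => d.insert p.1 p.2) m := by
  intro inv
  induction inv with
  | nil => intro V W n m _; rfl
  | cons i inv ih =>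
    intro V W n m h
    have ha : pvSkipA V (V.length + 1) n = pvNf V n :=
      pvSkipA_eq V _ n (Nat.lt_succ_of_le (pvK_le_len V n))
    have hvw : pvNf V n = pvNf W n := pvNf_congr h
    set a := pvNf W n with hadef
    have hh : List.foldl pvStepA (n, m, V) (i :: inv) =
        List.foldl pvStepA (a, m.insert i a, V ++ [a]) inv := by
      simp only [List.foldl_cons, pvStepA, ha, hvw]
    rw [hh, List.length_cons]
    simp only [pvSL]
    rw [List.zip_cons_cons, List.foldl_cons]
    have hcong : ∀ x, a ≤ x → (x ∈ V ++ [a] ↔ x ∈ W ++ [a]) := by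
      intro x hx
      have hna : n ≤ x := by have := pvNf_ge W n; omega
      simp only [List.mem_append]
      rw [h x hna]
    rw [ih (V ++ [a]) (W ++ [a]) a (m.insert i a) hcong, pvSL_append (pvNf_not_mem W n) inv.length]

-- counting: pvD steps down across an occupied slot, stays across a free one
theorem pvD_step_mem (V : List Int) {n : Int} (hn : n ∈ V) : pvD V n = pvD V (n + 1) + 1 := by
  classical
  unfold pvD
  have : V.toFinset.filter (fun x => n ≤ x) = insert n (V.toFinset.filter (fun x => n + 1 ≤ x)) := by
    ext x
    simp only [Finset.mem_filter, Finset.mem_insert, List.mem_toFinset]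
    constructor
    · rintro ⟨hm, hge⟩
      by_cases hx : x = n
      · exact Or.inl hx
      · exact Or.inr ⟨hm, by omega⟩
    · rintro (rfl | ⟨hm, hge⟩)
      · exact ⟨hn, le_refl _⟩
      · exact ⟨hm, by omega⟩
  rw [this, Finset.card_insert_of_notMem]
  simp only [Finset.mem_filter]
  intro h
  omega

theorem pvD_step_not_mem (V : List Int) {n : Int} (hn : n ∉ V) : pvD V n = pvD V (n + 1) := by
  classical
  unfold pvD
  congr 1
  ext x
  simp only [Finset.mem_filter, List.mem_toFinset]
  constructor
  · rintro ⟨hm, hge⟩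
    refine ⟨hm, ?_⟩
    rcases eq_or_lt_of_le hge with rfl | h
    · exact absurd hm hn
    · omega
  · rintro ⟨hm, hge⟩
    exact ⟨hm, by omega⟩

-- B's bulk form: the first `need` non-members of V in [n, b) are exactly pvSL V need n,
-- provided the window is wide enough
theorem pvTake_filter_range (V : List Int) (b : Int) :
    ∀ (f : Nat) (need : Nat) (n : Int), (b - n).toNat ≤ f →
    (need : Int) + pvD V n ≤ b - n →
    ((PySem.List.pyRange n b 1).filter (fun x => decide (x ∉ V))).take need = pvSL V need n := by
  intro f
  induction f with
  | zero =>
    intro need n hf hb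
    have h0 : (0 : Int) ≤ (pvD V n : Int) := Int.natCast_nonneg _
    have hneed : need = 0 := by omega
    subst hneed
    simp [pvSL]
  | succ f ih =>
    intro need n hf hb
    cases need with
    | zero => simp [pvSL]
    | succ k =>
      have h0 : (0 : Int) ≤ (pvD V n : Int) := Int.natCast_nonneg _
      have hlt : n < b := by omega
      rw [PySem.List.pyRange_one_cons hlt, List.filter_cons]
      have hfn : (b - (n + 1)).toNat ≤ f := by omega
      by_cases hn : n ∈ V
      · rw [if_neg (by simp [hn])]
        have hD := pvD_step_mem V hn
        have hrec := ih (k + 1) (n + 1) hfn (by omega)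
        rw [hrec]
        exact (pvSL_congr (V := V) (W := V) _ (fun x _ => Iff.rfl)).symm ▸
          (by simp only [pvSL]; rw [pvNf_mem_step V hn])
      · rw [if_pos (by simp [hn]), List.take_succ_cons]
        have hD := pvD_step_not_mem V hn
        have hrec := ih k (n + 1) hfn (by omega)
        rw [hrec]
        simp only [pvSL]
        have hnf : pvNf V n = n := by unfold pvNf; rw [pvK_not_mem V hn]; simp
        rw [hnf]

-- the filtered range is strictly increasing, so Python's sorted() leaves it unchanged
theorem pvSorted_filter_range (V : List Int) (a b : Int) :
    PySem.List.sorted ((PySem.List.pyRange a b 1).filter (fun x => decide (x ∉ V)))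
      (fun x => x) false
    = (PySem.List.pyRange a b 1).filter (fun x => decide (x ∉ V)) := by
  refine PySem.List.sorted_eq_self_of_pairwise
    ((PySem.List.pyRange a b 1).filter (fun x => decide (x ∉ V))) (fun x => x) ?_
  have h : (PySem.List.pyRange a b 1).Pairwise (· < ·) := PySem.List.pairwise_lt_pyRange_one a b
  exact (h.filter _).imp (fun h => le_of_lt h)

-- ===== VERDICT (by name: the statement is the Claim_ definition above) =====
theorem get_id_map_spec : Claim_equal_get_id_map := by
  intro ids _
  unfold Spec_get_id_map
  simp only [get_id_map, get_id_map_alt]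
  set valid := ids.filter (fun i => (1 : Int) ≤ i) with hv
  set inv := ids.filter (fun i => i < (1 : Int)) with hi
  set S := PySem.Set.ofList valid with hS
  have hmem : ∀ x : Int, (1 : Int) ≤ x → (x ∈ valid ↔ x ∈ S) := by
    intro x _
    exact (PySem.Set.mem_ofList (xs := valid) (y := x)).symm
  rw [pvA_fold inv valid S 1 PySem.Dict.empty hmem]
  rw [pvSorted_filter_range S 1 ((inv.length : Int) + S.length + 1)]
  have hbound : ((inv.length : Nat) : Int) + pvD S 1 ≤ ((inv.length : Int) + S.length + 1) - 1 := by
    have := pvD_le_len S 1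
    omega
  rw [pvTake_filter_range S ((inv.length : Int) + S.length + 1)
    ((((inv.length : Int) + S.length + 1) - 1).toNat) inv.length 1 (by omega) hbound]
  rfl
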